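-- pv_equiv track=rewrite | github.com/phillipclapham/flowscript-agents | flowscript_agents/continuity.py | _measure_sections
-- ===== SOURCE A (Python) =====
-- def _measure_sections(text: str) -> dict[str, int]:
--     """Measure character count per section."""
--     sections: dict[str, int] = {}
--     current_section = "_header"
--     current_chars = 0
--
--     for line in text.split("\n"):
--         if line.startswith("## "):
--             # Save previous section
--             if current_chars > 0:
--                 sections[current_section] = current_chars
--             current_section = line[3:].strip()
--             current_chars = len(line) + 1
--         else:
--             current_chars += len(line) + 1
--
--     # Save last section
--     if current_chars > 0:
--         sections[current_section] = current_chars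
--
--     return sections
-- ===== SOURCE B (Python) =====
-- def _measure_sections(text: str) -> dict[str, int]:
--     """Measure character count per section."""
--     # Pass 1: partition the lines into ordered (section_name, lines) groups.
--     groups: list[tuple[str, list[str]]] = []
--     for line in text.split("\n"):
--         if line.startswith("## "):
--             groups.append((line[3:].strip(), [line]))
--         elif groups:
--             groups[-1][1].append(line)
--         else:
--             groups.append(("_header", [line]))
--     # Pass 2: one count per group; duplicate names overwrite (last value wins).
--     sections: dict[str, int] = {}
--     for name, lines in groups:
--         sections[name] = sum(len(line) + 1 for line in lines)
--     return sections
-- ===== Notes on version B (the rewrite author's own statement) =====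
-- stated objective: alternative
-- what changed: Replaces A's single fold carrying (dict, current_section, current_chars) with two passes: first partition the lines into ordered (name, lines) groups, then compute each section's count as a sum over its group; the count>0 guard disappears because only a missing leading group can be empty.
import Mathlib
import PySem

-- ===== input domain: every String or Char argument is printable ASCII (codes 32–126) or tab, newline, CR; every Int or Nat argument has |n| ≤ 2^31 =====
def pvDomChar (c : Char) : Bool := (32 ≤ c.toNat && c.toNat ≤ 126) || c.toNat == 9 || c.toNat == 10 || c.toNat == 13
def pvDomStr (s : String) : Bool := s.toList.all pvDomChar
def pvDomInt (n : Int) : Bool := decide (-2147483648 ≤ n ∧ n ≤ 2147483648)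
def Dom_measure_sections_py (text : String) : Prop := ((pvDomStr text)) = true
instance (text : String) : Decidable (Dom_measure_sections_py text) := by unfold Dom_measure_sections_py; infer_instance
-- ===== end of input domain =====

-- B replaces A's single fold over (dict, section, chars) by two passes: group the lines
-- per section first, then sum each group; objective: alternative decomposition, same cost.

-- ===== PORT A =====
def measure_sections_py (text : String) : List (String × Int) :=
  let st := ((PySem.Str.split? text "\n").getD []).foldl
    (fun (s : PySem.Dict String Int × String × Int) line =>
      if PySem.Str.startswith line "## " then
        let d := if s.2.2 > 0 then s.1.insert s.2.1 s.2.2 else s.1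
        (d, PySem.Str.strip (PySem.Str.slice line (some 3) none), PySem.Str.len line + 1)
      else
        (s.1, s.2.1, s.2.2 + (PySem.Str.len line + 1)))
    (PySem.Dict.empty, "_header", 0)
  (if st.2.2 > 0 then st.1.insert st.2.1 st.2.2 else st.1).items

-- ===== PORT B =====
-- groups[-1][1].append(line) : append a line to the last group's line list
def pvAppendLast (gs : List (String × List String)) (line : String) : List (String × List String) :=
  match gs with
  | [] => []
  | [(n, l)] => [(n, l ++ [line])]
  | g :: rest => g :: pvAppendLast rest line

def measure_sections_py_alt (text : String) : List (String × Int) :=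
  let groups := ((PySem.Str.split? text "\n").getD []).foldl
    (fun (gs : List (String × List String)) line =>
      if PySem.Str.startswith line "## " then
        gs ++ [(PySem.Str.strip (PySem.Str.slice line (some 3) none), [line])]
      else if gs = [] then
        [("_header", [line])]
      else
        pvAppendLast gs line) []
  (groups.foldl
    (fun (d : PySem.Dict String Int) g =>
      d.insert g.1 ((g.2.map (fun line => PySem.Str.len line + 1)).sum))
    PySem.Dict.empty).items

-- ===== PRECONDITION & SPEC =====

def Spec_measure_sections_py (text : String) (out : List (String × Int)) : Prop := out = measure_sections_py_alt text
instance (text : String) (out : List (String × Int)) : Decidable (Spec_measure_sections_py text out) := by unfold Spec_measure_sections_py; infer_instance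

-- ===== CLAIM (what is proved, stated in full; the proofs are below) =====
def Claim_equal_measure_sections_py : Prop := ∀ (text : String), Dom_measure_sections_py text → Spec_measure_sections_py text (measure_sections_py text)

-- ===== LEMMAS AND PROOFS =====

-- proof-only abbreviations for the two fold bodies and the measures
def pvStepA (s : PySem.Dict String Int × String × Int) (line : String) :
    PySem.Dict String Int × String × Int :=
  if PySem.Str.startswith line "## " then
    let d := if s.2.2 > 0 then s.1.insert s.2.1 s.2.2 else s.1
    (d, PySem.Str.strip (PySem.Str.slice line (some 3) none), PySem.Str.len line + 1)
  else
    (s.1, s.2.1, s.2.2 + (PySem.Str.len line + 1))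

def pvStepB (gs : List (String × List String)) (line : String) : List (String × List String) :=
  if PySem.Str.startswith line "## " then
    gs ++ [(PySem.Str.strip (PySem.Str.slice line (some 3) none), [line])]
  else if gs = [] then
    [("_header", [line])]
  else
    pvAppendLast gs line

def pvInit : PySem.Dict String Int × String × Int := (PySem.Dict.empty, "_header", 0)

def pvGsum (l : List String) : Int := (l.map (fun line => PySem.Str.len line + 1)).sum

def pvDictOf (gs : List (String × List String)) : PySem.Dict String Int :=
  gs.foldl (fun d g => d.insert g.1 (pvGsum g.2)) PySem.Dict.empty

theorem pvGsum_nonneg (l : List String) : 0 ≤ pvGsum l := by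
  apply List.sum_nonneg
  intro x hx
  simp only [List.mem_map] at hx
  obtain ⟨s, _, rfl⟩ := hx
  have := PySem.Str.len_eq s
  omega

theorem pvGsum_append (l : List String) (x : String) :
    pvGsum (l ++ [x]) = pvGsum l + (PySem.Str.len x + 1) := by
  simp [pvGsum]

theorem pvGsum_pos (l : List String) (hl : l ≠ []) : 0 < pvGsum l := by
  cases l with
  | nil => exact absurd rfl hl
  | cons a t =>
    have h1 := PySem.Str.len_eq a
    have h2 := pvGsum_nonneg t
    have : pvGsum (a :: t) = (PySem.Str.len a + 1) + pvGsum t := by simp [pvGsum]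
    rw [this]; omega

theorem pvDictOf_append (init : List (String × List String)) (n : String) (l : List String) :
    pvDictOf (init ++ [(n, l)]) = (pvDictOf init).insert n (pvGsum l) := by
  simp [pvDictOf, List.foldl_append]

theorem pvAppendLast_append (init : List (String × List String)) (n : String)
    (l : List String) (x : String) :
    pvAppendLast (init ++ [(n, l)]) x = init ++ [(n, l ++ [x])] := by
  induction init with
  | nil => rfl
  | cons g rest ih =>
    cases rest with
    | nil => simp [pvAppendLast]
    | cons g2 rest2 => simpa [pvAppendLast] using ih

-- invariant of the two folds: A's state is B's groups minus the still-open last group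
theorem pvInv (ls : List String) :
    (ls.foldl pvStepB [] = [] ∧ ls.foldl pvStepA pvInit = pvInit) ∨
    ∃ init n l, l ≠ [] ∧ ls.foldl pvStepB [] = init ++ [(n, l)] ∧
      ls.foldl pvStepA pvInit = (pvDictOf init, n, pvGsum l) := by
  induction ls using List.reverseRecOn with
  | nil => exact Or.inl ⟨rfl, rfl⟩
  | append_singleton ls x ih =>
    rw [List.foldl_append, List.foldl_append]
    simp only [List.foldl_cons, List.foldl_nil]
    rcases ih with ⟨hB, hA⟩ | ⟨init, n, l, hl, hB, hA⟩
    · rw [hB, hA]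
      by_cases h : PySem.Str.startswith x "## " = true
      · refine Or.inr ⟨[], PySem.Str.strip (PySem.Str.slice x (some 3) none), [x],
          by simp, ?_, ?_⟩
        · simp only [pvStepB]; rw [if_pos h]
        · simp only [pvStepA, pvInit]; rw [if_pos h]
          norm_num [pvDictOf, pvGsum]
      · refine Or.inr ⟨[], "_header", [x], by simp, ?_, ?_⟩
        · simp only [pvStepB]; rw [if_neg h]; simp
        · simp only [pvStepA, pvInit]; rw [if_neg h]
          norm_num [pvDictOf, pvGsum]
    · rw [hB, hA]
      by_cases h : PySem.Str.startswith x "## " = true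
      · refine Or.inr ⟨init ++ [(n, l)], PySem.Str.strip (PySem.Str.slice x (some 3) none),
          [x], by simp, ?_, ?_⟩
        · simp only [pvStepB]; rw [if_pos h]
        · have hpos : pvGsum l > 0 := pvGsum_pos l hl
          simp only [pvStepA]; rw [if_pos h, if_pos hpos, ← pvDictOf_append]
          norm_num [pvGsum]
      · refine Or.inr ⟨init, n, l ++ [x], by simp, ?_, ?_⟩
        · simp only [pvStepB]; rw [if_neg h, if_neg (by simp), pvAppendLast_append]
        · simp only [pvStepA]; rw [if_neg h, pvGsum_append]

-- ===== VERDICT (by name: the statement is the Claim_ definition above) =====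
theorem measure_sections_py_spec : Claim_equal_measure_sections_py := by
  intro text _
  unfold Spec_measure_sections_py
  change
    (let st := ((PySem.Str.split? text "\n").getD []).foldl pvStepA pvInit
     (if st.2.2 > 0 then st.1.insert st.2.1 st.2.2 else st.1).items) =
    (let groups := ((PySem.Str.split? text "\n").getD []).foldl pvStepB []
     (groups.foldl (fun (d : PySem.Dict String Int) g => d.insert g.1 (pvGsum g.2))
       PySem.Dict.empty).items)
  simp only []
  rcases pvInv ((PySem.Str.split? text "\n").getD []) with ⟨hB, hA⟩ | ⟨init, n, l, hl, hB, hA⟩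
  · rw [hB, hA]
    simp [pvInit]
  · rw [hB, hA]
    have hpos : pvGsum l > 0 := pvGsum_pos l hl
    simp only [if_pos hpos]
    rw [← pvDictOf_append]
    rfl
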